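-- pv_equiv track=rewrite | github.com/kinganupamdutta27/ai-job-search-backend | agents/linkedin_job_agent.py | _best_option_text
-- ===== SOURCE A (Python) =====
-- from typing import Any, Callable, Optional
--
-- def _best_option_text(target: str, options: list[str]) -> Optional[str]:
--     """Find the best matching option text from a list of option labels."""
--     target_lower = target.lower().strip()
--     for opt in options:
--         if opt.strip().lower() == target_lower:
--             return opt.strip()
--     for opt in options:
--         if target_lower in opt.strip().lower() or opt.strip().lower() in target_lower:
--             return opt.strip()
--     return None
-- ===== SOURCE B (Python) =====
-- def _best_option_text(target: str, options: list[str]):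
--     """Single pass: return on exact match immediately, remember the first
--     substring match as a fallback, return the fallback (or None) at the end."""
--     target_lower = target.lower().strip()
--     fallback = None
--     for opt in options:
--         stripped = opt.strip()
--         norm = stripped.lower()
--         if norm == target_lower:
--             return stripped
--         if fallback is None and (target_lower in norm or norm in target_lower):
--             fallback = stripped
--     return fallback
-- ===== Notes on version B (the rewrite author's own statement) =====
-- stated objective: simpler
-- what changed: Replaces A's two sequential scans over options by a single pass that returns on the first exact match and keeps the first substring match as a fallback, also normalizing each option once instead of up to four times.
import Mathlib
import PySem

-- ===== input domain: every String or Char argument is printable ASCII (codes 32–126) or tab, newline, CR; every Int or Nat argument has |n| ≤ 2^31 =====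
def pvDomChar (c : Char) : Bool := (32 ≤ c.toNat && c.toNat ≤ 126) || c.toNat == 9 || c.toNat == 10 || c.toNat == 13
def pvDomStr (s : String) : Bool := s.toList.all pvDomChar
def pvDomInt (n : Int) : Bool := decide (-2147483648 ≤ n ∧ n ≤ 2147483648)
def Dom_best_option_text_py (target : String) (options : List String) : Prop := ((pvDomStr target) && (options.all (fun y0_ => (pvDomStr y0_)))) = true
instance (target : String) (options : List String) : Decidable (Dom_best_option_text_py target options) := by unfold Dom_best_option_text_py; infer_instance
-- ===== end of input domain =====

-- B replaces A's two sequential scans by one pass with an exact-match early return and a first-substring-match fallback; objective: simpler.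

-- ===== PORT A =====
-- first loop of A: return opt.strip() on exact normalized match
def pyA_loop1 (tl : String) : List String → Option String
  | [] => none
  | opt :: rest =>
    if PySem.Str.lower (PySem.Str.strip opt) == tl then some (PySem.Str.strip opt)
    else pyA_loop1 tl rest

-- second loop of A: return opt.strip() on first substring match (either direction)
def pyA_loop2 (tl : String) : List String → Option String
  | [] => none
  | opt :: rest =>
    if PySem.Str.isIn tl (PySem.Str.lower (PySem.Str.strip opt))
        || PySem.Str.isIn (PySem.Str.lower (PySem.Str.strip opt)) tl then
      some (PySem.Str.strip opt)
    else pyA_loop2 tl rest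

def best_option_text_py (target : String) (options : List String) : Option String :=
  let target_lower := PySem.Str.strip (PySem.Str.lower target)
  match pyA_loop1 target_lower options with
  | some r => some r
  | none => pyA_loop2 target_lower options

-- ===== PORT B =====
-- B's single loop, carrying the fallback accumulator
def pyB_loop (tl : String) (fallback : Option String) : List String → Option String
  | [] => fallback
  | opt :: rest =>
    let stripped := PySem.Str.strip opt
    let norm := PySem.Str.lower stripped
    if norm == tl then some stripped
    else
      pyB_loop tl
        (if fallback.isNone && (PySem.Str.isIn tl norm || PySem.Str.isIn norm tl) then
          some stripped
         else fallback) rest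

def best_option_text_py_alt (target : String) (options : List String) : Option String :=
  let target_lower := PySem.Str.strip (PySem.Str.lower target)
  pyB_loop target_lower none options

-- ===== PRECONDITION & SPEC =====
def Spec_best_option_text_py (target : String) (options : List String) (out : Option String) : Prop := out = best_option_text_py_alt target options
instance (target : String) (options : List String) (out : Option String) : Decidable (Spec_best_option_text_py target options out) := by unfold Spec_best_option_text_py; infer_instance

-- ===== CLAIM (what is proved, stated in full; the proofs are below) =====
def Claim_equal_best_option_text_py : Prop := ∀ (target : String) (options : List String), Dom_best_option_text_py target options → Spec_best_option_text_py target options (best_option_text_py target options)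

-- ===== LEMMAS AND PROOFS =====

-- B's single pass equals: A's exact-match scan, then the pending fallback, then A's substring scan.
theorem pyB_loop_eq (tl : String) (opts : List String) : ∀ (fb : Option String),
    pyB_loop tl fb opts =
      match pyA_loop1 tl opts with
      | some r => some r
      | none => match fb with
        | some x => some x
        | none => pyA_loop2 tl opts := by
  induction opts with
  | nil => intro fb; cases fb <;> rfl
  | cons opt rest ih =>
    intro fb
    by_cases hex : PySem.Str.lower (PySem.Str.strip opt) == tl
    · simp [pyB_loop, pyA_loop1, hex]
    · cases fb with
      | some x =>
        simp [pyB_loop, pyA_loop1, hex, ih]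
      | none =>
        by_cases hsub : (PySem.Str.isIn tl (PySem.Str.lower (PySem.Str.strip opt))
            || PySem.Str.isIn (PySem.Str.lower (PySem.Str.strip opt)) tl) = true
        · simp only [pyB_loop, pyA_loop1, pyA_loop2, hex, hsub, if_false, Bool.false_eq_true,
            Option.isNone_none, Bool.true_and, if_true, ih]
        · simp only [pyB_loop, pyA_loop1, pyA_loop2, hex, hsub, if_false, Bool.false_eq_true,
            Option.isNone_none, Bool.true_and, ih]

-- ===== VERDICT (by name: the statement is the Claim_ definition above) =====
theorem best_option_text_py_spec : Claim_equal_best_option_text_py := by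
  intro target options _
  unfold Spec_best_option_text_py best_option_text_py best_option_text_py_alt
  rw [pyB_loop_eq]
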